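-- pv_equiv track=rewrite | github.com/gbcolborne/ner_eval | eval/hardeval.py | convert_bio2_to_bilou
-- ===== SOURCE A (Python) =====
-- def get_bio2_mention_offsets(labels):
--     """Given a list of BIO-2 labels, find mention boundaries, yield a
--     (start offset, end offset) tuple for each mention.
--
--     """
--     prefixes = [x[0] for x in labels]
--     # Pad labels with an extra O at the end to avoid going out of
--     # bounds when we look for the end offset of the mentons we find
--     prefixes.append("O")
--     i = 0
--     while i < len(labels):
--         prefix = prefixes[i]
--         if prefix == "B":
--             end = i
--             while prefixes[end+1][0] == "I":
--                 end += 1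
--             yield (i, end)
--             i = end + 1
--         else:
--             i += 1
--
-- def convert_bio2_to_bilou(labels):
--     """Given a list of BIO-2 labels, return list of corresponding BILOU
--     labels.
--
--     """
--     bilou_labels = ["O" for _ in range(len(labels))]
--     for (beg, end) in get_bio2_mention_offsets(labels):
--         etype = labels[beg][2:]
--         length = 1  + end - beg
--         if length > 1:
--             bilou_labels[beg] = "B-{}".format(etype)
--             bilou_labels[end] = "L-{}".format(etype)
--             for i in range(beg+1,end):
--                 bilou_labels[i] = "I-{}".format(etype)
--         else:
--             bilou_labels[beg] = "U-{}".format(etype)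
--     return bilou_labels
-- ===== SOURCE B (Python) =====
-- def convert_bio2_to_bilou(labels):
--     """Given a list of BIO-2 labels, return list of corresponding BILOU
--     labels.  Single linear pass with one-token lookahead."""
--     n = len(labels)
--     out = []
--     active = None
--     for i, lab in enumerate(labels):
--         p = lab[0]
--         nxt = labels[i + 1][0] if i + 1 < n else "O"
--         if p == "B":
--             t = lab[2:]
--             if nxt == "I":
--                 out.append("B-" + t)
--                 active = t
--             else:
--                 out.append("U-" + t)
--                 active = None
--         elif p == "I" and active is not None:
--             if nxt == "I":
--                 out.append("I-" + active)
--             else: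
--                 out.append("L-" + active)
--                 active = None
--         else:
--             out.append("O")
--             active = None
--     return out
-- ===== Notes on version B (the rewrite author's own statement) =====
-- stated objective: simpler
-- what changed: Replaced the generator-of-mention-offsets plus array-fill design by a single linear pass with one-token lookahead maintaining the active entity type.
import Mathlib
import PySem

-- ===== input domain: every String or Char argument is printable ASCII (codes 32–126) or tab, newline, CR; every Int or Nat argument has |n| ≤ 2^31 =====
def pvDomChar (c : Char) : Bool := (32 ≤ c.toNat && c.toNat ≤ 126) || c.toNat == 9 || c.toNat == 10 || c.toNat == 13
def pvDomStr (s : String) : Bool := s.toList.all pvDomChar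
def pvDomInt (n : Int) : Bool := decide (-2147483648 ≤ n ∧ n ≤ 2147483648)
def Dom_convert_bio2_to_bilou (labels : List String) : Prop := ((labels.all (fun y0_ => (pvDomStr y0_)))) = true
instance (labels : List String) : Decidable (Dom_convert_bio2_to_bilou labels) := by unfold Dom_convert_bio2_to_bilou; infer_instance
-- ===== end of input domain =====

-- B replaces A's generator-of-mention-offsets + array-fill design by one linear pass with
-- one-token lookahead; same output, objective: simpler.

-- first character of a label, s[0]; on Pre_ every label is nonempty so headD's default is never used
def pvHp (s : String) : Char := s.toList.headD 'O'
-- s[2:]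
def pvTyp (s : String) : String := String.mk (s.toList.drop 2)

-- ===== PORT A =====
-- inner 'while prefixes[end+1][0] == "I": end += 1' of get_bio2_mention_offsets
-- (prefixes entries are 1-char strings, so the extra [0] is the identity; ported as Chars);
-- fuel bounds the iteration count, always sufficient when called below
def pvFindEnd (prefixes : List Char) : Nat → Nat → Nat
  | e, fuel + 1 => if prefixes.getD (e + 1) 'O' = 'I' then pvFindEnd prefixes (e + 1) fuel else e
  | e, 0 => e

-- outer 'while i < len(labels)' of get_bio2_mention_offsets, yielding (start, end) pairs
def pvMentions (prefixes : List Char) (n : Nat) : Nat → Nat → List (Nat × Nat)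
  | i, fuel + 1 =>
    if i < n then
      if prefixes.getD i 'O' = 'B' then
        let e := pvFindEnd prefixes i (n - i)
        (i, e) :: pvMentions prefixes n (e + 1) fuel
      else
        pvMentions prefixes n (i + 1) fuel
    else []
  | _, 0 => []

-- body of 'for (beg, end) in …' : the three assignment groups into bilou_labels
def pvFill (out : List String) (etype : String) (beg e : Nat) : List String :=
  if 1 + e - beg > 1 then
    let out1 := out.set beg ("B-" ++ etype)
    let out2 := out1.set e ("L-" ++ etype)
    (List.range' (beg + 1) (e - (beg + 1))).foldl (fun o i => o.set i ("I-" ++ etype)) out2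
  else
    out.set beg ("U-" ++ etype)

def convert_bio2_to_bilou (labels : List String) : List String :=
  let n := labels.length
  let prefixes := labels.map pvHp ++ ['O']   -- [x[0] for x in labels] + the padding "O"
  (pvMentions prefixes n 0 n).foldl
    (fun out m => pvFill out (pvTyp (labels.getD m.1 "")) m.1 m.2)
    (List.replicate n "O")

-- ===== PORT B =====
-- the loop of Source B as structural recursion; 'active' is the Optional entity type
def pvBGo (active : Option String) : List String → List String
  | [] => []
  | lab :: rest =>
    let p := pvHp lab
    let nxt := pvHp (rest.headD "")   -- labels[i+1][0] if i+1 < n else "O" (pvHp "" = 'O')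
    if p = 'B' then
      let t := pvTyp lab
      if nxt = 'I' then ("B-" ++ t) :: pvBGo (some t) rest
      else ("U-" ++ t) :: pvBGo none rest
    else if p = 'I' then
      match active with
      | some a =>
        if nxt = 'I' then ("I-" ++ a) :: pvBGo (some a) rest
        else ("L-" ++ a) :: pvBGo none rest
      | none => "O" :: pvBGo none rest
    else "O" :: pvBGo none rest

def convert_bio2_to_bilou_alt (labels : List String) : List String :=
  pvBGo none labels

-- ===== PRECONDITION & SPEC =====
-- Pre_ excludes lists containing an empty-string label, on which Python A raises IndexError (x[0]).
def Pre_convert_bio2_to_bilou (labels : List String) : Prop := ∀ s ∈ labels, s ≠ ""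
instance (labels : List String) : Decidable (Pre_convert_bio2_to_bilou labels) := by
  unfold Pre_convert_bio2_to_bilou; infer_instance
def pvWitness_convert_bio2_to_bilou : List String := ["B-PER", "I-PER", "I-PER", "O", "B-ORG", "I"]
def Spec_convert_bio2_to_bilou (labels : List String) (out : List String) : Prop := out = convert_bio2_to_bilou_alt labels
instance (labels : List String) (out : List String) : Decidable (Spec_convert_bio2_to_bilou labels out) := by unfold Spec_convert_bio2_to_bilou; infer_instance

-- ===== CLAIM (what is proved, stated in full; the proofs are below) =====
def Claim_equal_convert_bio2_to_bilou : Prop := ∀ (labels : List String), Dom_convert_bio2_to_bilou labels → Pre_convert_bio2_to_bilou labels → Spec_convert_bio2_to_bilou labels (convert_bio2_to_bilou labels)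

-- ===== LEMMAS AND PROOFS =====

-- the BILOU block a mention opening at some label of type t with k following I-tokens produces
def pvRefBlk (t : String) (k : Nat) : List String :=
  if k = 0 then ["U-" ++ t]
  else ("B-" ++ t) :: (List.replicate (k - 1) ("I-" ++ t) ++ ["L-" ++ t])

-- reference segment-wise recursion both ports are proved equal to
def pvRef : List String → List String
  | [] => []
  | l :: rest =>
    if pvHp l = 'B' then
      pvRefBlk (pvTyp l) ((rest.takeWhile (fun s => pvHp s = 'I')).length)
        ++ pvRef (rest.drop ((rest.takeWhile (fun s => pvHp s = 'I')).length))
    else "O" :: pvRef rest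
termination_by l => l.length
decreasing_by
  all_goals simp only [List.length_drop, List.length_cons]; omega

theorem pvRefBlk_length (t : String) (k : Nat) : (pvRefBlk t k).length = k + 1 := by
  rcases k with _ | k' <;> simp [pvRefBlk]

theorem pvHp_empty_ne_I : pvHp "" ≠ 'I' := by decide

theorem pvBGo_run (k : Nat) : ∀ (rest : List String) (t : String),
    (rest.takeWhile (fun s => pvHp s = 'I')).length = k → 1 ≤ k →
    pvBGo (some t) rest =
      List.replicate (k - 1) ("I-" ++ t) ++ ["L-" ++ t] ++ pvBGo none (rest.drop k) := by
  induction k with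
  | zero => intro rest t _ h; omega
  | succ k ih =>
    intro rest t hk _
    cases rest with
    | nil => simp at hk
    | cons r rs =>
      simp only [List.takeWhile_cons] at hk
      by_cases hr : pvHp r = 'I'
      · simp only [hr, decide_true, if_pos, List.length_cons] at hk
        have hB : pvHp r ≠ 'B' := by rw [hr]; decide
        have hk' : (rs.takeWhile (fun s => pvHp s = 'I')).length = k := by omega
        cases k with
        | zero =>
          have hnxt : pvHp (rs.head?.getD "") ≠ 'I' := by
            cases rs with
            | nil => exact pvHp_empty_ne_I
            | cons l2 tl =>
              simp only [List.head?_cons, Option.getD_some]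
              intro hc
              simp [hc] at hk'
          simp [pvBGo, hr, hnxt]
        | succ k' =>
          have hnxt : pvHp (rs.head?.getD "") = 'I' := by
            cases rs with
            | nil => simp at hk'
            | cons l2 tl =>
              by_cases hc : pvHp l2 = 'I'
              · simpa using hc
              · simp [hc] at hk'
          simp [pvBGo, hr, hnxt]
          rw [ih rs t hk' (by omega)]
          simp [List.replicate_succ]
      · simp [hr] at hk

theorem pvBGo_none_eq_ref (labels : List String) : pvBGo none labels = pvRef labels := by
  induction labels using pvRef.induct with
  | case1 => simp [pvBGo, pvRef]
  | case2 l rest hB ih =>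
    rw [pvRef, if_pos hB]
    by_cases hk : (rest.takeWhile (fun s => pvHp s = 'I')).length = 0
    · have hnxt : pvHp (rest.head?.getD "") ≠ 'I' := by
        cases rest with
        | nil => exact pvHp_empty_ne_I
        | cons l2 tl =>
          simp only [List.head?_cons, Option.getD_some]
          intro hc
          simp [hc] at hk
      have lhs : pvBGo none (l :: rest) = ("U-" ++ pvTyp l) :: pvBGo none rest := by
        simp [pvBGo, hB, hnxt]
      rw [hk] at ih ⊢
      simp only [List.drop_zero] at ih ⊢
      rw [lhs, pvRefBlk, if_pos rfl, ih]
      simp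
    · have hk1 : 1 ≤ (rest.takeWhile (fun s => pvHp s = 'I')).length := by omega
      have hnxt : pvHp (rest.head?.getD "") = 'I' := by
        cases rest with
        | nil => simp at hk
        | cons l2 tl =>
          by_cases hc : pvHp l2 = 'I'
          · simpa using hc
          · simp [hc] at hk
      have lhs : pvBGo none (l :: rest)
          = ("B-" ++ pvTyp l) :: pvBGo (some (pvTyp l)) rest := by
        simp [pvBGo, hB, hnxt]
      rw [lhs, pvBGo_run _ rest (pvTyp l) rfl hk1, ih, pvRefBlk, if_neg hk]
      simp
  | case3 l rest hB ih =>
    rw [pvRef, if_neg hB]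
    simp only [pvBGo]
    rw [if_neg hB]
    by_cases hI : pvHp l = 'I' <;> simp [hI, ih]

-- the padded prefix list reads like the unpadded one under getD 'O'
theorem pvPrefixes_getD (labels : List String) (j : Nat) :
    (labels.map pvHp ++ ['O']).getD j 'O' = (labels.map pvHp).getD j 'O' := by
  rcases lt_trichotomy j labels.length with h | h | h
  · rw [List.getD_append _ _ _ _ (by simpa using h)]
  · subst h
    rw [List.getD_eq_getElem?_getD, List.getElem?_append_right (by simp),
        List.getD_eq_getElem?_getD]
    simp
  · rw [List.getD_eq_getElem?_getD, List.getD_eq_getElem?_getD,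
        List.getElem?_eq_none (by simp; omega), List.getElem?_eq_none (by simp; omega)]

theorem pvGetD_map_hp (labels : List String) (j : Nat) (h : j < labels.length) :
    (labels.map pvHp).getD j 'O' = pvHp labels[j] := by
  rw [List.getD_eq_getElem?_getD, List.getElem?_map]
  simp [List.getElem?_eq_getElem h]

theorem pvFindEnd_eq (labels : List String) : ∀ (fuel e : Nat),
    labels.length - e ≤ fuel →
    pvFindEnd (labels.map pvHp ++ ['O']) e fuel =
      e + ((labels.drop (e + 1)).takeWhile (fun s => pvHp s = 'I')).length := by
  intro fuel
  induction fuel with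
  | zero =>
    intro e he
    have : labels.drop (e + 1) = [] := List.drop_eq_nil_of_le (by omega)
    simp [pvFindEnd, this]
  | succ fuel ih =>
    intro e he
    rw [pvFindEnd, pvPrefixes_getD]
    by_cases h1 : e + 1 < labels.length
    · rw [pvGetD_map_hp labels (e + 1) h1]
      have hdrop : labels.drop (e + 1) = labels[e + 1] :: labels.drop (e + 1 + 1) :=
        List.drop_eq_getElem_cons h1
      by_cases hI : pvHp labels[e + 1] = 'I'
      · rw [if_pos hI, ih (e + 1) (by omega), hdrop]
        simp only [List.takeWhile_cons, hI, decide_true, if_pos, List.length_cons]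
        omega
      · rw [if_neg hI, hdrop]
        simp [hI]
    · have h2 : (labels.map pvHp).getD (e + 1) 'O' = 'O' := by
        rw [List.getD_eq_getElem?_getD, List.getElem?_eq_none (by simp; omega)]; rfl
      rw [h2, if_neg (by decide)]
      have : labels.drop (e + 1) = [] := List.drop_eq_nil_of_le (by omega)
      simp [this]

-- foldl of point writes over a contiguous range = splice in a replicate block
theorem pvFoldlSet_range' (v : String) : ∀ (k s : Nat) (out : List String), s + k ≤ out.length →
    (List.range' s k).foldl (fun o i => o.set i v) out =
      out.take s ++ List.replicate k v ++ out.drop (s + k) := by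
  intro k
  induction k with
  | zero => intro s out h; simp
  | succ k ih =>
    intro s out h
    rw [List.range'_succ, List.foldl_cons, ih (s + 1) _ (by simp; omega)]
    have hs : s < out.length := by omega
    rw [List.set_eq_take_cons_drop v hs, List.take_append, List.drop_append]
    have hlen : (out.take s).length = s := by simp; omega
    rw [hlen]
    rw [show s + 1 - s = 1 by omega, show s + 1 + k - s = 1 + k by omega,
        List.take_of_length_le (by omega : (out.take s).length ≤ s + 1),
        List.drop_of_length_le (by omega : (out.take s).length ≤ s + 1 + k)]
    rw [show 1 + k = k + 1 by omega, List.drop_succ_cons, List.drop_drop]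
    rw [show s + 1 + k = s + (k + 1) by omega]
    simp [List.replicate_succ]

-- the fill step rewrites the three writes of A as a splice of the BILOU block
theorem pvFill_eq (out : List String) (t : String) (b k : Nat)
    (he : b + k < out.length) :
    pvFill out t b (b + k) =
      out.take b ++ (pvRefBlk t k ++ out.drop (b + k + 1)) := by
  rcases Nat.eq_zero_or_pos k with hk | hk
  · subst hk
    rw [pvFill, if_neg (by omega), pvRefBlk, if_pos rfl]
    rw [List.set_eq_take_cons_drop _ (by omega)]
    simp
  · rw [pvFill, if_pos (by omega), pvRefBlk, if_neg (by omega)]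
    simp only []
    rw [pvFoldlSet_range' _ (b + k - (b + 1)) (b + 1) _ (by simp; omega)]
    have hb : b < out.length := by omega
    have h1 : ((out.set b ("B-" ++ t)).set (b + k) ("L-" ++ t)).take (b + 1)
        = out.take b ++ ["B-" ++ t] := by
      rw [List.take_set_of_le (by omega), List.set_eq_take_cons_drop _ hb, List.take_append]
      have hlen : (out.take b).length = b := by simp; omega
      rw [hlen, List.take_of_length_le (by omega), show b + 1 - b = 1 by omega]
      simp
    have h2 : b + 1 + (b + k - (b + 1)) = b + k := by omega
    rw [h2, h1]
    have h3 : ((out.set b ("B-" ++ t)).set (b + k) ("L-" ++ t)).drop (b + k)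
        = ("L-" ++ t) :: out.drop (b + k + 1) := by
      rw [List.set_eq_take_cons_drop _ (by simp; omega), List.drop_append]
      have hlen : ((out.set b ("B-" ++ t)).take (b + k)).length = b + k := by simp; omega
      rw [hlen, List.drop_of_length_le (by omega), Nat.sub_self,
          List.drop_set_of_lt (by omega)]
      simp
    rw [h3]
    simp [show b + k - (b + 1) = k - 1 by omega]

theorem pvMain (labels : List String) : ∀ (fuel i : Nat) (pre : List String),
    i ≤ labels.length → labels.length - i ≤ fuel → pre.length = i →
    (pvMentions (labels.map pvHp ++ ['O']) labels.length i fuel).foldl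
        (fun out m => pvFill out (pvTyp (labels.getD m.1 "")) m.1 m.2)
        (pre ++ List.replicate (labels.length - i) "O")
      = pre ++ pvRef (labels.drop i) := by
  intro fuel
  induction fuel with
  | zero =>
    intro i pre hi hf hp
    have hd : labels.drop i = [] := List.drop_eq_nil_of_le (by omega)
    have h0 : labels.length - i = 0 := by omega
    simp [pvMentions, hd, pvRef, h0]
  | succ fuel ih =>
    intro i pre hi hf hp
    by_cases hlt : i < labels.length
    · rw [pvMentions, if_pos hlt, pvPrefixes_getD, pvGetD_map_hp labels i hlt]
      have hdrop : labels.drop i = labels[i] :: labels.drop (i + 1) :=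
        List.drop_eq_getElem_cons hlt
      have hgetD : labels.getD i "" = labels[i] := by
        rw [List.getD_eq_getElem?_getD, List.getElem?_eq_getElem hlt]; rfl
      by_cases hB : pvHp labels[i] = 'B'
      · rw [if_pos hB]
        rw [pvFindEnd_eq labels (labels.length - i) i (by omega)]
        set k := ((labels.drop (i + 1)).takeWhile (fun s => pvHp s = 'I')).length with hkdef
        have hkle : k ≤ labels.length - (i + 1) := by
          have := (List.takeWhile_sublist
              (l := labels.drop (i + 1)) (fun s => decide (pvHp s = 'I'))).length_le
          simp only [List.length_drop] at this
          omega
        rw [List.foldl_cons]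
        simp only [hgetD]
        rw [pvFill_eq _ _ i k (by simp [hp]; omega)]
        have htake : (pre ++ List.replicate (labels.length - i) "O").take i = pre := by
          rw [List.take_append, hp, List.take_of_length_le (by omega), Nat.sub_self]
          simp
        have hdrop2 : (pre ++ List.replicate (labels.length - i) "O").drop (i + k + 1)
            = List.replicate (labels.length - (i + k + 1)) "O" := by
          rw [List.drop_append, List.drop_of_length_le (by omega), List.drop_replicate, hp]
          rw [show labels.length - i - (i + k + 1 - i) = labels.length - (i + k + 1) by omega]
          simp
        rw [htake, hdrop2]
        rw [show pre ++ (pvRefBlk (pvTyp labels[i]) k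
              ++ List.replicate (labels.length - (i + k + 1)) "O")
            = (pre ++ pvRefBlk (pvTyp labels[i]) k)
              ++ List.replicate (labels.length - (i + k + 1)) "O" by simp]
        rw [ih (i + k + 1) (pre ++ pvRefBlk (pvTyp labels[i]) k) (by omega) (by omega)
              (by simp [hp, pvRefBlk_length]; omega)]
        rw [hdrop, pvRef, if_pos hB]
        simp only [← hkdef]
        rw [List.drop_drop]
        rw [show i + 1 + k = i + k + 1 by omega]
        simp
      · rw [if_neg hB]
        have hrep : List.replicate (labels.length - i) "O"
            = "O" :: List.replicate (labels.length - (i + 1)) "O" := by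
          rw [show labels.length - i = (labels.length - (i + 1)) + 1 by omega]
          rfl
        rw [hrep, show pre ++ "O" :: List.replicate (labels.length - (i + 1)) "O"
              = (pre ++ ["O"]) ++ List.replicate (labels.length - (i + 1)) "O" by simp]
        rw [ih (i + 1) (pre ++ ["O"]) (by omega) (by omega) (by simp [hp])]
        rw [hdrop, pvRef, if_neg hB]
        simp
    · rw [pvMentions, if_neg hlt]
      have hd : labels.drop i = [] := List.drop_eq_nil_of_le (by omega)
      have h0 : labels.length - i = 0 := by omega
      simp [hd, pvRef, h0]

-- ===== VERDICT (by name: the statement is the Claim_ definition above) =====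
theorem convert_bio2_to_bilou_spec : Claim_equal_convert_bio2_to_bilou := by
  intro labels _ _
  unfold Spec_convert_bio2_to_bilou convert_bio2_to_bilou convert_bio2_to_bilou_alt
  rw [pvBGo_none_eq_ref]
  have := pvMain labels labels.length 0 [] (by omega) (by omega) rfl
  simpa using this
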